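-- pv_equiv track=rewrite | github.com/MrBrantCode/unitest_baseline | mut_generate/mist_train_cf/cf_69002/solution.py | custom_mix_strings
-- ===== SOURCE A (Python) =====
-- def custom_mix_strings(s1: str, s2: str) -> str:
--     """ Meld two pieces of text by executing a letter-wise interchange operation, followed by an inversion of the final fused outcome
--     """
--     if len(s1) == 0 or len(s2) == 0:
--         return ""
--
--     s1, s2 = list(s1), list(s2)
--
--     len_s1, len_s2 = len(s1), len(s2)
--
--     min_len = min(len_s1, len_s2)
--
--     # Alphabet-wise swapping
--     for i in range(0, min_len):
--         s1[i], s2[i] = s2[i], s1[i]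
--
--     # Concatenate the two strings
--     melded_string = "".join(s1) + "".join(s2)
--
--     # Invert the output
--     return melded_string[::-1]
-- ===== SOURCE B (Python) =====
-- def custom_mix_strings(s1: str, s2: str) -> str:
--     """Meld two strings by slice concatenation instead of per-character swapping, then reverse."""
--     if len(s1) == 0 or len(s2) == 0:
--         return ""
--     m = min(len(s1), len(s2))
--     return (s2[:m] + s1[m:] + s1[:m] + s2[m:])[::-1]
-- ===== Notes on version B (the rewrite author's own statement) =====
-- stated objective: simpler
-- what changed: Replaces the per-index swap loop over two char lists with direct slice concatenation s2[:m]+s1[m:]+s1[:m]+s2[m:] followed by one reversal.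
import Mathlib
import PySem

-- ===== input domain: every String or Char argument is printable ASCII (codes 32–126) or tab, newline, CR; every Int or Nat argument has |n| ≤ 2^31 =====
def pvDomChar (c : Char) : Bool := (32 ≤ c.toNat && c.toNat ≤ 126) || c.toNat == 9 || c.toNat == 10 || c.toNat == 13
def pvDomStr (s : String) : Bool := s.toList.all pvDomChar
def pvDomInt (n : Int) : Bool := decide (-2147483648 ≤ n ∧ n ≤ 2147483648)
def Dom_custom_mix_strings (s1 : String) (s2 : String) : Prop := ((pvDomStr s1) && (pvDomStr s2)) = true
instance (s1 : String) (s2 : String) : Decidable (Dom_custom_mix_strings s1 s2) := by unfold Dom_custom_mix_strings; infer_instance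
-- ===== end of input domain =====

-- B replaces A's per-index swap loop with direct slice concatenation plus one reversal (objective: simpler).


-- ===== PORT A =====
-- one iteration of A's swap loop body: s1[i], s2[i] = s2[i], s1[i]
def pvSwapStep (p : List Char × List Char) (i : Nat) : List Char × List Char :=
  (p.1.set i (p.2.getD i ' '), p.2.set i (p.1.getD i ' '))

def custom_mix_strings (s1 : String) (s2 : String) : String :=
  if s1.toList.length = 0 ∨ s2.toList.length = 0 then ""
  else
    let l1 := s1.toList
    let l2 := s2.toList
    let min_len := min l1.length l2.length
    -- for i in range(0, min_len): s1[i], s2[i] = s2[i], s1[i]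
    let p := (List.range min_len).foldl pvSwapStep (l1, l2)
    -- melded_string = "".join(s1) + "".join(s2);  melded_string[::-1] is list reversal (PySem.Str.slice?_none_none_neg_one)
    String.ofList (p.1 ++ p.2).reverse

-- ===== PORT B =====
def custom_mix_strings_alt (s1 : String) (s2 : String) : String :=
  if s1.toList.length = 0 ∨ s2.toList.length = 0 then ""
  else
    let m := min s1.toList.length s2.toList.length
    -- (s2[:m] + s1[m:] + s1[:m] + s2[m:])[::-1]
    String.ofList (s2.toList.take m ++ s1.toList.drop m ++ s1.toList.take m ++ s2.toList.drop m).reverse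

-- ===== PRECONDITION & SPEC =====
def Spec_custom_mix_strings (s1 : String) (s2 : String) (out : String) : Prop := out = custom_mix_strings_alt s1 s2
instance (s1 : String) (s2 : String) (out : String) : Decidable (Spec_custom_mix_strings s1 s2 out) := by unfold Spec_custom_mix_strings; infer_instance

-- ===== CLAIM (what is proved, stated in full; the proofs are below) =====
def Claim_equal_custom_mix_strings : Prop := ∀ (s1 : String) (s2 : String), Dom_custom_mix_strings s1 s2 → Spec_custom_mix_strings s1 s2 (custom_mix_strings s1 s2)

-- ===== LEMMAS AND PROOFS =====

-- the swap loop over range m turns (l1, l2) into (l2[:m]+l1[m:], l1[:m]+l2[m:])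
theorem pvSwapFold_eq (l1 l2 : List Char) (m : Nat) (h1 : m ≤ l1.length) (h2 : m ≤ l2.length) :
    (List.range m).foldl pvSwapStep (l1, l2) =
      (l2.take m ++ l1.drop m, l1.take m ++ l2.drop m) := by
  induction m with
  | zero => simp
  | succ n ih =>
    have hn1 : n ≤ l1.length := Nat.le_of_succ_le h1
    have hn2 : n ≤ l2.length := Nat.le_of_succ_le h2
    have hlt1 : n < l1.length := h1
    have hlt2 : n < l2.length := h2
    rw [List.range_succ, List.foldl_append, ih hn1 hn2]
    simp only [List.foldl_cons, List.foldl_nil, pvSwapStep]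
    have hget1 : (l2.take n ++ l1.drop n).getD n ' ' = l1[n] := by
      rw [List.getD_eq_getElem?_getD, List.getElem?_append_right (by simp [hn2])]
      simp [hn2, hlt1]
    have hget2 : (l1.take n ++ l2.drop n).getD n ' ' = l2[n] := by
      rw [List.getD_eq_getElem?_getD, List.getElem?_append_right (by simp [hn1])]
      simp [hn1, hlt2]
    have hset1 : (l2.take n ++ l1.drop n).set n (l2[n]) = l2.take (n + 1) ++ l1.drop (n + 1) := by
      rw [List.set_append_right _ _ (by simp [hn2])]
      simp only [List.length_take, Nat.min_eq_left hn2, Nat.sub_self,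
        List.drop_eq_getElem_cons hlt1, List.set_cons_zero]
      rw [show List.take (n + 1) l2 = List.take n l2 ++ [l2[n]] from by
        rw [List.take_add_one, List.getElem?_eq_getElem hlt2]; rfl]
      rw [List.append_assoc]; rfl
    have hset2 : (l1.take n ++ l2.drop n).set n (l1[n]) = l1.take (n + 1) ++ l2.drop (n + 1) := by
      rw [List.set_append_right _ _ (by simp [hn1])]
      simp only [List.length_take, Nat.min_eq_left hn1, Nat.sub_self,
        List.drop_eq_getElem_cons hlt2, List.set_cons_zero]
      rw [show List.take (n + 1) l1 = List.take n l1 ++ [l1[n]] from by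
        rw [List.take_add_one, List.getElem?_eq_getElem hlt1]; rfl]
      rw [List.append_assoc]; rfl
    rw [hget1, hget2, hset1, hset2]

-- ===== VERDICT (by name: the statement is the Claim_ definition above) =====
theorem custom_mix_strings_spec : Claim_equal_custom_mix_strings := by
  intro s1 s2 _
  unfold Spec_custom_mix_strings custom_mix_strings custom_mix_strings_alt
  by_cases h : s1.toList.length = 0 ∨ s2.toList.length = 0
  · rw [if_pos h, if_pos h]
  · simp only [h, if_false]
    rw [pvSwapFold_eq _ _ _ (Nat.min_le_left _ _) (Nat.min_le_right _ _)]
    simp
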